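-- pv_equiv track=rewrite | github.com/sivasagar2103/Core-DSA | DSA_SDE_strivers/recursion_and_backtracking/print_all_permutations.py | find_permutations_unique
-- ===== SOURCE A (Python) =====
-- def find_permutations_unique(word):
--     word.sort()
--     n = len(word)
--     seen = [0] * n
--     result = []
--
--     def unique_permutations(path):
--         if len(path) == n:
--             result.append(''.join(path[:]))
--             return
--
--         for i in range(n):
--             if seen[i]:
--                 continue
--
--             if i > 0 and word[i-1] == word[i] and not seen[i-1]:
--                 continue
--
--             seen[i] = 1
--             path.append(word[i])
--             unique_permutations(path)
--             path.pop()
--             seen[i] = 0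
--
--     unique_permutations([])
--     return result
-- ===== SOURCE B (Python) =====
-- # B: counter-based backtracking over distinct characters (same in-place sort side effect as A).
-- def find_permutations_unique(word):
--     word.sort()
--     n = len(word)
--     counts = {}
--     for ch in word:
--         counts[ch] = counts.get(ch, 0) + 1
--     result = []
--
--     def rec(path):
--         if len(path) == n:
--             result.append(''.join(path))
--             return
--         for ch in counts:
--             if counts[ch] > 0:
--                 counts[ch] -= 1
--                 path.append(ch)
--                 rec(path)
--                 path.pop()
--                 counts[ch] += 1
--
--     rec([])
--     return result
-- ===== Notes on version B (the rewrite author's own statement) =====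
-- stated objective: idiomatic
-- what changed: A backtracks over all n indices with a seen-flag array and a skip-the-duplicate guard; B builds a frequency dict of the sorted characters once and recurses over the distinct keys, decrementing and restoring remaining counts, so the flag array and the duplicate guard disappear.
import Mathlib
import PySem

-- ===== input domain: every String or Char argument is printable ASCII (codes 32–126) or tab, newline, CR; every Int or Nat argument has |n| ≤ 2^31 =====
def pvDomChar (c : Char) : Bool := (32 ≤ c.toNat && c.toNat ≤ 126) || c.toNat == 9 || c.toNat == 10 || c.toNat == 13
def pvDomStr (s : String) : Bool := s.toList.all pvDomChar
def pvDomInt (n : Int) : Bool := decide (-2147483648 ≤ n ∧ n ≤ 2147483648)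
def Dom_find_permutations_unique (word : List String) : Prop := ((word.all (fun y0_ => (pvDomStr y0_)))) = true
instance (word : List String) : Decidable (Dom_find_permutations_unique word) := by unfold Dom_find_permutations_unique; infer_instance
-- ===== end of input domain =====

-- B replaces A's seen-flag array and duplicate-skip guard by a frequency map iterated over distinct
-- characters (more idiomatic). Python A and B both sort `word` in place; the equivalence proved here
-- is about the RETURN value (B performs the same mutation).

-- ===== PORT A =====
-- fuel = n bounds the recursion depth (path grows by 1 per level, stops at length n); Python needs no fuel.
def find_permutations_unique.aRec (word : List String) (n : Nat) :
    Nat → List String → List Int → List String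
  | 0, path, _ => if path.length = n then [PySem.Str.join "" path] else []
  | f + 1, path, seen =>
    if path.length = n then [PySem.Str.join "" path]    -- result.append(''.join(path[:]))
    else
      -- for i in range(n): …
      (PySem.List.pyRange 0 (n : Int) 1).foldl (fun acc i =>
        if PySem.List.pyGetD seen i 0 ≠ 0 then acc    -- if seen[i]: continue
        else if 0 < i ∧ PySem.List.pyGetD word (i - 1) "" = PySem.List.pyGetD word i ""
                ∧ PySem.List.pyGetD seen (i - 1) 0 = 0 then acc    -- duplicate-skip guard
        else
          -- seen[i] = 1; path.append(word[i]); recurse; path.pop(); seen[i] = 0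
          -- (i ∈ range(n), so 0 ≤ i < n = len(seen): List.set at i.toNat is Python's seen[i] = 1 exactly)
          acc ++ find_permutations_unique.aRec word n f
                   (path ++ [PySem.List.pyGetD word i ""]) (seen.set i.toNat 1)) []

def find_permutations_unique (word : List String) : List String :=
  let w := PySem.List.sorted word (fun x => x) false    -- word.sort()
  let n := w.length
  find_permutations_unique.aRec w n n [] (List.replicate n 0)

-- ===== PORT B =====
def find_permutations_unique_alt.bRec (n : Nat) :
    Nat → List String → PySem.Dict String Int → List String
  | 0, path, _ => if path.length = n then [PySem.Str.join "" path] else []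
  | f + 1, path, counts =>
    if path.length = n then [PySem.Str.join "" path]    -- result.append(''.join(path))
    else
      -- for ch in counts: …
      counts.keys.foldl (fun acc ch =>
        if 0 < counts.getD ch 0 then
          -- counts[ch] -= 1; path.append(ch); rec(path); path.pop(); counts[ch] += 1
          acc ++ find_permutations_unique_alt.bRec n f (path ++ [ch])
                   (counts.insert ch (counts.getD ch 0 - 1))
        else acc) []

def find_permutations_unique_alt (word : List String) : List String :=
  let w := PySem.List.sorted word (fun x => x) false    -- word.sort()
  let n := w.length
  let counts := w.foldl (fun d ch => d.insert ch (d.getD ch 0 + 1)) PySem.Dict.empty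
  find_permutations_unique_alt.bRec n n [] counts

-- ===== PRECONDITION & SPEC =====
def Spec_find_permutations_unique (word : List String) (out : List String) : Prop := out = find_permutations_unique_alt word
instance (word : List String) (out : List String) : Decidable (Spec_find_permutations_unique word out) := by unfold Spec_find_permutations_unique; infer_instance

-- ===== CLAIM (what is proved, stated in full; the proofs are below) =====
def Claim_equal_find_permutations_unique : Prop := ∀ (word : List String), Dom_find_permutations_unique word → Spec_find_permutations_unique word (find_permutations_unique word)

-- ===== LEMMAS AND PROOFS =====

-- Block abstraction: a state of A's (sorted word, seen) is a list of runs (value, #seen-flags set, #free),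
-- and B's counts dict holds exactly (value, #free) for each run.
def pvWOf (bs : List (String × Nat × Nat)) : List String :=
  (bs.map (fun p => List.replicate (p.2.1 + p.2.2) p.1)).flatten

def pvSeenOf (bs : List (String × Nat × Nat)) : List Int :=
  (bs.map (fun p => List.replicate p.2.1 (1 : Int) ++ List.replicate p.2.2 0)).flatten

def pvDictOf (bs : List (String × Nat × Nat)) : PySem.Dict String Int :=
  PySem.Dict.mk (bs.map (fun p => (p.1, (p.2.2 : Int))))

def pvUpdAt (bs : List (String × Nat × Nat)) (v : String) : List (String × Nat × Nat) :=
  bs.map (fun q => if q.1 = v then (q.1, q.2.1 + 1, q.2.2 - 1) else q)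

-- run decomposition of the sorted word
def pvRuns : List String → List (String × Nat × Nat)
  | [] => []
  | v :: t => (v, 0, 1 + (t.takeWhile (fun x => x == v)).length) :: pvRuns (t.dropWhile (fun x => x == v))
termination_by l => l.length
decreasing_by simp only [List.length_cons]; exact Nat.lt_succ_of_le (List.length_dropWhile_le _ _)


theorem pvWOf_nil : pvWOf [] = [] := rfl
theorem pvWOf_cons (p : String × Nat × Nat) (bs : List (String × Nat × Nat)) :
    pvWOf (p :: bs) = List.replicate (p.2.1 + p.2.2) p.1 ++ pvWOf bs := by simp [pvWOf]
theorem pvWOf_append (xs ys : List (String × Nat × Nat)) :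
    pvWOf (xs ++ ys) = pvWOf xs ++ pvWOf ys := by simp [pvWOf]
theorem pvSeenOf_cons (p : String × Nat × Nat) (bs : List (String × Nat × Nat)) :
    pvSeenOf (p :: bs) = (List.replicate p.2.1 (1 : Int) ++ List.replicate p.2.2 0) ++ pvSeenOf bs := by
  simp [pvSeenOf]
theorem pvSeenOf_append (xs ys : List (String × Nat × Nat)) :
    pvSeenOf (xs ++ ys) = pvSeenOf xs ++ pvSeenOf ys := by simp [pvSeenOf]
theorem pvSeenOf_length (bs : List (String × Nat × Nat)) :
    (pvSeenOf bs).length = (pvWOf bs).length := by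
  induction bs with
  | nil => rfl
  | cons p bs ih => simp [pvSeenOf_cons, pvWOf_cons, ih]; omega

theorem pvGetD_int {α : Type} (xs : List α) (d : α) (m : Nat) :
    PySem.List.pyGetD xs ((m : Nat) : Int) d = xs.getD m d := by
  rw [PySem.List.pyGetD_of_nonneg xs d (by positivity)]
  simp

theorem pvMem_wOf (bs : List (String × Nat × Nat)) (x : String) (hx : x ∈ pvWOf bs) :
    ∃ q ∈ bs, x = q.1 := by
  simp only [pvWOf, List.mem_flatten, List.mem_map] at hx
  obtain ⟨l, ⟨q, hq, rfl⟩, hxl⟩ := hx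
  exact ⟨q, hq, (List.eq_of_mem_replicate hxl)⟩

theorem pvSet_seen (pre bs' : List (String × Nat × Nat)) (v : String) (a b : Nat) (hb : 0 < b)
    (hvpre : ∀ q ∈ pre, q.1 ≠ v) (hvbs : ∀ q ∈ bs', q.1 ≠ v) :
    (pvSeenOf (pre ++ (v, a, b) :: bs')).set ((pvWOf pre).length + a) 1
      = pvSeenOf (pvUpdAt (pre ++ (v, a, b) :: bs') v) := by
  have hupd : pvUpdAt (pre ++ (v, a, b) :: bs') v = pre ++ (v, a + 1, b - 1) :: bs' := by
    simp only [pvUpdAt, List.map_append, List.map_cons]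
    rw [List.map_congr_left (fun q hq => if_neg (hvpre q hq)),
        List.map_congr_left (fun q hq => if_neg (hvbs q hq))]
    simp
  rw [hupd, pvSeenOf_append, pvSeenOf_append, pvSeenOf_cons, pvSeenOf_cons,
      List.set_append, if_neg (by rw [pvSeenOf_length]; omega), pvSeenOf_length]
  congr 1
  rw [Nat.add_sub_cancel_left, List.set_append, if_pos (by simp; omega),
      List.set_append, if_neg (by simp)]
  simp only [List.length_replicate, Nat.sub_self]
  obtain ⟨b', rfl⟩ : ∃ b', b = b' + 1 := ⟨b - 1, by omega⟩
  simp only [List.replicate_succ, Nat.add_sub_cancel, List.set_cons_zero]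
  rw [List.append_cons, ← List.replicate_succ']
  simp [List.replicate_succ]

-- ===== VERDICT (by name: the statement is the Claim_ definition above) =====

theorem pvSeg (w : List String) (n : Nat) (f : Nat) (path : List String) (seen : List Int)
    (off a b : Nat) (v : String)
    (hw : ∀ k, k < a + b → w.getD (off + k) "" = v)
    (hs : ∀ k, k < a + b → seen.getD (off + k) 0 = if k < a then 1 else 0)
    (hbnd : off = 0 ∨ w.getD (off - 1) "" ≠ v) (acc : List String) :
    (PySem.List.pyRange (off : Int) ((off + a + b : Nat) : Int) 1).foldl
      (fun acc i =>
        if PySem.List.pyGetD seen i 0 ≠ 0 then acc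
        else if 0 < i ∧ PySem.List.pyGetD w (i - 1) "" = PySem.List.pyGetD w i ""
                ∧ PySem.List.pyGetD seen (i - 1) 0 = 0 then acc
        else acc ++ find_permutations_unique.aRec w n f
               (path ++ [PySem.List.pyGetD w i ""]) (seen.set i.toNat 1)) acc
    = if 0 < b then
        acc ++ find_permutations_unique.aRec w n f (path ++ [v]) (seen.set (off + a) 1)
      else acc := by
  have hsplit : PySem.List.pyRange (off : Int) ((off + a + b : Nat) : Int) 1
      = PySem.List.pyRange (off : Int) ((off + a : Nat) : Int) 1
        ++ PySem.List.pyRange ((off + a : Nat) : Int) ((off + a + b : Nat) : Int) 1 := by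
    apply PySem.List.pyRange_one_append <;> push_cast <;> omega
  rw [hsplit, List.foldl_append]
  have h1 : ∀ (acc0 : List String), List.foldl
      (fun acc i =>
        if PySem.List.pyGetD seen i 0 ≠ 0 then acc
        else if 0 < i ∧ PySem.List.pyGetD w (i - 1) "" = PySem.List.pyGetD w i ""
                ∧ PySem.List.pyGetD seen (i - 1) 0 = 0 then acc
        else acc ++ find_permutations_unique.aRec w n f
               (path ++ [PySem.List.pyGetD w i ""]) (seen.set i.toNat 1)) acc0
      (PySem.List.pyRange (off : Int) ((off + a : Nat) : Int) 1) = acc0 := by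
    intro acc0
    rw [PySem.List.foldl_congr_mem _ _ (fun acc _ => acc) acc0 ?_, List.foldl_fixed]
    intro acc2 i hi
    rw [PySem.List.mem_pyRange_one] at hi
    lift i to Nat using (by omega)
    rw [pvGetD_int]
    have hk : seen.getD i 0 = 1 := by
      have := hs (i - off) (by omega)
      rw [if_pos (by omega)] at this
      rwa [show off + (i - off) = i by omega] at this
    rw [if_pos (by rw [hk]; norm_num)]
  rw [h1]
  rcases Nat.eq_zero_or_pos b with hb0 | hbpos
  · subst hb0
    rw [PySem.List.pyRange_one_eq_nil (by push_cast; omega)]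
    simp
  · rw [if_pos hbpos,
        PySem.List.pyRange_one_cons (by push_cast; omega), List.foldl_cons]
    have e1 : PySem.List.pyGetD seen ((off + a : Nat) : Int) 0 = 0 := by
      rw [pvGetD_int]
      have := hs a (by omega)
      rwa [if_neg (by omega)] at this
    have e2 : PySem.List.pyGetD w ((off + a : Nat) : Int) "" = v := by
      rw [pvGetD_int]; exact hw a (by omega)
    have hguard : ¬(0 < ((off + a : Nat) : Int)
        ∧ PySem.List.pyGetD w (((off + a : Nat) : Int) - 1) "" = PySem.List.pyGetD w ((off + a : Nat) : Int) ""
        ∧ PySem.List.pyGetD seen (((off + a : Nat) : Int) - 1) 0 = 0) := by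
      rintro ⟨hip, heq, hsn⟩
      have hposn : 0 < off + a := by exact_mod_cast hip
      have hc : (((off + a : Nat) : Int) - 1) = ((off + a - 1 : Nat) : Int) := by omega
      rcases Nat.eq_zero_or_pos a with ha0 | hap
      · subst ha0
        rcases hbnd with h0 | hne
        · omega
        · rw [hc, pvGetD_int, e2] at heq
          exact hne (by simpa using heq)
      · rw [hc, pvGetD_int] at hsn
        have h1s := hs (a - 1) (by omega)
        rw [if_pos (by omega), show off + (a - 1) = off + a - 1 by omega] at h1s
        rw [h1s] at hsn
        norm_num at hsn
    have htail : ∀ (acc0 : List String), List.foldl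
        (fun acc i =>
          if PySem.List.pyGetD seen i 0 ≠ 0 then acc
          else if 0 < i ∧ PySem.List.pyGetD w (i - 1) "" = PySem.List.pyGetD w i ""
                  ∧ PySem.List.pyGetD seen (i - 1) 0 = 0 then acc
          else acc ++ find_permutations_unique.aRec w n f
                 (path ++ [PySem.List.pyGetD w i ""]) (seen.set i.toNat 1)) acc0
        (PySem.List.pyRange (((off + a : Nat) : Int) + 1) ((off + a + b : Nat) : Int) 1) = acc0 := by
      intro acc0
      rw [PySem.List.foldl_congr_mem _ _ (fun acc _ => acc) acc0 ?_, List.foldl_fixed]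
      intro acc2 i hi
      rw [PySem.List.mem_pyRange_one] at hi
      lift i to Nat using (by omega)
      have hmem : off + a + 1 ≤ i ∧ i < off + a + b := by omega
      obtain ⟨hl, hr⟩ := hmem
      have hc1 : ((i : Nat) : Int) - 1 = ((i - 1 : Nat) : Int) := by omega
      simp only [hc1, pvGetD_int]
      have hsi : seen.getD i 0 = 0 := by
        have := hs (i - off) (by omega)
        rw [if_neg (by omega)] at this
        rwa [show off + (i - off) = i by omega] at this
      rw [if_neg (by rw [hsi]; norm_num), if_pos ?_]
      refine ⟨by exact_mod_cast (by omega : 0 < i), ?_, ?_⟩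
      · have e1 := hw (i - 1 - off) (by omega)
        have e2 := hw (i - off) (by omega)
        rw [show off + (i - 1 - off) = i - 1 by omega] at e1
        rw [show off + (i - off) = i by omega] at e2
        rw [e1, e2]
      · have e3 := hs (i - 1 - off) (by omega)
        rw [if_neg (by omega), show off + (i - 1 - off) = i - 1 by omega] at e3
        exact e3
    rw [htail]
    rw [if_neg (by rw [e1]; norm_num), if_neg hguard, e2,
        show ((off + a : Nat) : Int).toNat = off + a from Int.toNat_natCast _]

theorem pvSplit (f : Nat) (path : List String) (bsF : List (String × Nat × Nat))
    (hp : (bsF.map (fun p => p.1)).Pairwise (· < ·)) :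
    ∀ (bs pre : List (String × Nat × Nat)) (acc : List String), bsF = pre ++ bs →
    (PySem.List.pyRange (((pvWOf pre).length : Nat) : Int) (((pvWOf bsF).length : Nat) : Int) 1).foldl
      (fun acc i =>
        if PySem.List.pyGetD (pvSeenOf bsF) i 0 ≠ 0 then acc
        else if 0 < i ∧ PySem.List.pyGetD (pvWOf bsF) (i - 1) "" = PySem.List.pyGetD (pvWOf bsF) i ""
                ∧ PySem.List.pyGetD (pvSeenOf bsF) (i - 1) 0 = 0 then acc
        else acc ++ find_permutations_unique.aRec (pvWOf bsF) (pvWOf bsF).length f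
               (path ++ [PySem.List.pyGetD (pvWOf bsF) i ""]) ((pvSeenOf bsF).set i.toNat 1)) acc
    = bs.foldl (fun acc p =>
        if 0 < p.2.2 then
          acc ++ find_permutations_unique.aRec (pvWOf bsF) (pvWOf bsF).length f
                   (path ++ [p.1]) (pvSeenOf (pvUpdAt bsF p.1))
        else acc) acc := by
  intro bs
  induction bs generalizing bsF with
  | nil =>
    intro pre acc hpre
    subst hpre
    rw [List.append_nil, PySem.List.pyRange_one_eq_nil (by omega)]
    rfl
  | cons p bs ih =>
    intro pre acc hpre
    obtain ⟨v, a, b⟩ := p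
    subst hpre
    have hwdec : pvWOf (pre ++ (v, a, b) :: bs)
        = pvWOf pre ++ (List.replicate (a + b) v ++ pvWOf bs) := by
      rw [pvWOf_append, pvWOf_cons]
    have hsdec : pvSeenOf (pre ++ (v, a, b) :: bs)
        = pvSeenOf pre ++ ((List.replicate a (1 : Int) ++ List.replicate b 0) ++ pvSeenOf bs) := by
      rw [pvSeenOf_append, pvSeenOf_cons]
    have hoffs : (pvSeenOf pre).length = (pvWOf pre).length := pvSeenOf_length pre
    have hlen : (pvWOf (pre ++ (v, a, b) :: bs)).length
        = (pvWOf pre).length + (a + b) + (pvWOf bs).length := by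
      rw [hwdec]; simp; omega
    -- pairwise facts
    have hp' := hp
    rw [List.map_append, List.pairwise_append] at hp'
    have hpre_lt : ∀ q ∈ pre, q.1 < v := fun q hq =>
      hp'.2.2 q.1 (List.mem_map_of_mem hq) v (by simp)
    have hbs_lt : ∀ q ∈ bs, v < q.1 := by
      have h2 := hp'.2.1
      rw [List.map_cons, List.pairwise_cons] at h2
      exact fun q hq => h2.1 q.1 (List.mem_map_of_mem hq)
    -- split the range
    rw [PySem.List.pyRange_one_append ((pvWOf pre).length : Int)
          (((pvWOf pre).length + a + b : Nat) : Int) _ (by push_cast; omega) (by push_cast; omega),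
        List.foldl_append]
    rw [pvSeg (pvWOf (pre ++ (v, a, b) :: bs)) (pvWOf (pre ++ (v, a, b) :: bs)).length f path
          (pvSeenOf (pre ++ (v, a, b) :: bs)) (pvWOf pre).length a b v ?hw ?hs ?hb acc]
    case hw =>
      intro k hk
      rw [hwdec, List.getD_append_right _ _ _ _ (by omega), Nat.add_sub_cancel_left,
          List.getD_append _ _ _ _ (by simpa using hk), List.getD_replicate _ hk]
    case hs =>
      intro k hk
      rw [hsdec, List.getD_append_right _ _ _ _ (by omega), hoffs, Nat.add_sub_cancel_left,
          List.getD_append _ _ _ _ (by simp; omega)]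
      rcases Nat.lt_or_ge k a with h | h
      · rw [List.getD_append _ _ _ _ (by simpa using h), List.getD_replicate _ h, if_pos h]
      · rw [List.getD_append_right _ _ _ _ (by simpa using h), if_neg (by omega),
            List.getD_replicate _ (by simp; omega)]
    case hb =>
      rcases Nat.eq_zero_or_pos (pvWOf pre).length with h0 | hposl
      · exact Or.inl h0
      · right
        rw [hwdec, List.getD_append _ _ _ _ (by omega)]
        intro hcon
        have hmem : (pvWOf pre).getD ((pvWOf pre).length - 1) "" ∈ pvWOf pre := by
          rw [List.getD_eq_getElem _ _ (by omega)]
          exact List.getElem_mem _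
        obtain ⟨q, hq, hqe⟩ := pvMem_wOf _ _ hmem
        have hqv : q.1 = v := by rw [← hqe]; exact hcon
        exact (hpre_lt q hq).ne hqv
    -- first block done; now the tail via ih
    rw [List.foldl_cons]
    have hstep : (if 0 < b then
          acc ++ find_permutations_unique.aRec (pvWOf (pre ++ (v, a, b) :: bs))
            (pvWOf (pre ++ (v, a, b) :: bs)).length f (path ++ [v])
            ((pvSeenOf (pre ++ (v, a, b) :: bs)).set ((pvWOf pre).length + a) 1)
        else acc)
        = (if 0 < (v, a, b).2.2 then
          acc ++ find_permutations_unique.aRec (pvWOf (pre ++ (v, a, b) :: bs))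
            (pvWOf (pre ++ (v, a, b) :: bs)).length f (path ++ [(v, a, b).1])
            (pvSeenOf (pvUpdAt (pre ++ (v, a, b) :: bs) (v, a, b).1))
        else acc) := by
      split_ifs with hb
      · rw [pvSet_seen pre bs v a b hb (fun q hq => (hpre_lt q hq).ne) (fun q hq => (hbs_lt q hq).ne')]
      · rfl
    rw [hstep]
    have hlen2 : ((pvWOf pre).length + a + b : Nat) = (pvWOf (pre ++ [(v, a, b)])).length := by
      rw [pvWOf_append]
      simp [pvWOf]
      omega
    rw [hlen2]
    exact ih (pre ++ (v, a, b) :: bs) hp (pre ++ [(v, a, b)]) _ (by simp)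

theorem pvFst_upd (bs : List (String × Nat × Nat)) (v : String) :
    (pvUpdAt bs v).map (fun p => p.1) = bs.map (fun p => p.1) := by
  simp only [pvUpdAt, List.map_map]
  apply List.map_congr_left
  intro q _
  by_cases h : q.1 = v <;> simp [h]

theorem pvNodupFst (bs : List (String × Nat × Nat))
    (hp : (bs.map (fun p => p.1)).Pairwise (· < ·)) : (bs.map (fun p => p.1)).Nodup :=
  hp.imp (fun h => ne_of_lt h)

theorem pvWOf_upd (bs : List (String × Nat × Nat)) (p : String × Nat × Nat)
    (hmem : p ∈ bs) (hb : 0 < p.2.2)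
    (hnd : (bs.map (fun q => q.1)).Nodup) :
    pvWOf (pvUpdAt bs p.1) = pvWOf bs := by
  simp only [pvWOf, pvUpdAt, List.map_map]
  congr 1
  apply List.map_congr_left
  intro q hq
  by_cases h : q.1 = p.1
  · have hqp : q = p := List.inj_on_of_nodup_map hnd hq hmem h
    subst hqp
    show List.replicate ((if q.1 = q.1 then (q.1, q.2.1 + 1, q.2.2 - 1) else q).2.1
        + (if q.1 = q.1 then (q.1, q.2.1 + 1, q.2.2 - 1) else q).2.2)
        (if q.1 = q.1 then (q.1, q.2.1 + 1, q.2.2 - 1) else q).1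
      = List.replicate (q.2.1 + q.2.2) q.1
    rw [if_pos h]
    show List.replicate (q.2.1 + 1 + (q.2.2 - 1)) q.1 = List.replicate (q.2.1 + q.2.2) q.1
    congr 1
    omega
  · simp [if_neg h]

theorem pvDictKeys (bs : List (String × Nat × Nat)) :
    (pvDictOf bs).keys = bs.map (fun p => p.1) := by
  simp [pvDictOf, PySem.Dict.keys_mk, List.map_map]

theorem pvDictGetD (bs : List (String × Nat × Nat)) (p : String × Nat × Nat)
    (hmem : p ∈ bs) (hnd : (bs.map (fun q => q.1)).Nodup) :
    (pvDictOf bs).getD p.1 0 = (p.2.2 : Int) := by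
  apply PySem.Dict.getD_of_mem_items
  · exact List.mem_map_of_mem (f := fun p => (p.1, (p.2.2 : Int))) hmem
  · rw [pvDictKeys]; exact hnd

theorem pvDictInsert (bs : List (String × Nat × Nat)) (p : String × Nat × Nat)
    (hmem : p ∈ bs) (hb : 0 < p.2.2)
    (hnd : (bs.map (fun q => q.1)).Nodup) :
    (pvDictOf bs).insert p.1 ((p.2.2 : Int) - 1) = pvDictOf (pvUpdAt bs p.1) := by
  apply PySem.Dict.ext
  have hcont : (pvDictOf bs).contains p.1 = true := by
    rw [PySem.Dict.contains_iff_mem_keys, pvDictKeys]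
    exact List.mem_map_of_mem hmem
  rw [PySem.Dict.items_insert_of_contains _ _ hcont]
  show ((bs.map (fun q => (q.1, (q.2.2 : Int)))).map _) = (pvUpdAt bs p.1).map _
  simp only [pvUpdAt, List.map_map]
  apply List.map_congr_left
  intro q hq
  by_cases h : q.1 = p.1
  · have hqp : q = p := List.inj_on_of_nodup_map hnd hq hmem h
    subst hqp
    simp
    omega
  · simp [h]

theorem pvBside (n f : Nat) (path : List String) (bsF : List (String × Nat × Nat))
    (hnd : (bsF.map (fun p => p.1)).Nodup) (acc : List String) :
    (pvDictOf bsF).keys.foldl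
      (fun acc ch =>
        if 0 < (pvDictOf bsF).getD ch 0 then
          acc ++ find_permutations_unique_alt.bRec n f (path ++ [ch])
                   ((pvDictOf bsF).insert ch ((pvDictOf bsF).getD ch 0 - 1))
        else acc) acc
    = bsF.foldl (fun acc p =>
        if 0 < p.2.2 then
          acc ++ find_permutations_unique_alt.bRec n f (path ++ [p.1]) (pvDictOf (pvUpdAt bsF p.1))
        else acc) acc := by
  rw [pvDictKeys, List.foldl_map]
  apply PySem.List.foldl_congr_mem
  intro acc2 p hp2
  rw [pvDictGetD bsF p hp2 hnd]
  by_cases h : 0 < p.2.2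
  · rw [if_pos (show (0:Int) < (p.2.2 : Int) by exact_mod_cast h), if_pos h,
        pvDictInsert bsF p hp2 h hnd]
  · rw [if_neg (show ¬ (0:Int) < (p.2.2 : Int) by exact_mod_cast h), if_neg h]

theorem pvMain (w : List String) (fuel : Nat) :
    ∀ (path : List String) (bsF : List (String × Nat × Nat)),
    pvWOf bsF = w → ((bsF.map (fun p => p.1)).Pairwise (· < ·)) →
    find_permutations_unique.aRec w w.length fuel path (pvSeenOf bsF)
      = find_permutations_unique_alt.bRec w.length fuel path (pvDictOf bsF) := by
  induction fuel with
  | zero =>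
    intro path bsF hw hp
    rfl
  | succ f ih =>
    intro path bsF hw hp
    subst hw
    simp only [find_permutations_unique.aRec, find_permutations_unique_alt.bRec]
    by_cases hl : path.length = (pvWOf bsF).length
    · rw [if_pos hl, if_pos hl]
    · rw [if_neg hl, if_neg hl]
      have hsplit := pvSplit f path bsF hp bsF [] [] rfl
      simp only [pvWOf_nil, List.length_nil, Nat.cast_zero] at hsplit
      rw [hsplit, pvBside (pvWOf bsF).length f path bsF (pvNodupFst bsF hp) []]
      apply PySem.List.foldl_congr_mem
      intro acc p hpmem
      by_cases hb : 0 < p.2.2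
      · rw [if_pos hb, if_pos hb,
            ih (path ++ [p.1]) (pvUpdAt bsF p.1)
              (pvWOf_upd bsF p hpmem hb (pvNodupFst bsF hp))
              (by rw [pvFst_upd]; exact hp)]
      · rw [if_neg hb, if_neg hb]

theorem pvDropWhile_gt (v : String) : ∀ (t : List String), (∀ u ∈ t, v ≤ u) → t.Pairwise (· ≤ ·) →
    ∀ u ∈ t.dropWhile (fun x => x == v), v < u := by
  intro t
  induction t with
  | nil => simp
  | cons x t' ih =>
    intro hle hp
    by_cases hx : x = v
    · rw [List.dropWhile_cons_of_pos (by simp [hx])]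
      exact ih (fun u hu => hle u (List.mem_cons_of_mem _ hu)) hp.tail
    · rw [List.dropWhile_cons_of_neg (by simp [hx])]
      intro u hu
      have hvx : v < x := lt_of_le_of_ne (hle x (List.mem_cons_self)) (Ne.symm hx)
      rcases List.mem_cons.mp hu with rfl | hu'
      · exact hvx
      · exact lt_of_lt_of_le hvx ((List.pairwise_cons.mp hp).1 u hu')

theorem pvTakeWhile_rep (v : String) (t : List String) :
    t.takeWhile (fun x => x == v) = List.replicate (t.takeWhile (fun x => x == v)).length v := by
  apply List.eq_replicate_length.mpr
  intro b hb
  have := List.mem_takeWhile_imp hb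
  simpa using this

theorem pvRuns_wOf : ∀ (w : List String), w.Pairwise (· ≤ ·) → pvWOf (pvRuns w) = w := by
  intro w
  induction w using pvRuns.induct with
  | case1 => intro _; simp [pvRuns, pvWOf]
  | case2 v t ih =>
    intro hp
    rw [pvRuns, pvWOf_cons, ih (hp.tail.sublist (List.dropWhile_sublist _))]
    rw [show (0 + (1 + (t.takeWhile (fun x => x == v)).length))
          = (t.takeWhile (fun x => x == v)).length + 1 by omega,
        List.replicate_succ, List.cons_append, ← pvTakeWhile_rep,
        List.takeWhile_append_dropWhile]

theorem pvRuns_fst_mem : ∀ (w : List String), ∀ p ∈ pvRuns w, p.1 ∈ w := by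
  intro w
  induction w using pvRuns.induct with
  | case1 => simp [pvRuns]
  | case2 v t ih =>
    intro p hp
    rw [pvRuns] at hp
    rcases List.mem_cons.mp hp with rfl | hp'
    · exact List.mem_cons_self
    · exact List.mem_cons_of_mem _ ((List.dropWhile_sublist _).mem (ih p hp'))

theorem pvRuns_pairwise : ∀ (w : List String), w.Pairwise (· ≤ ·) →
    ((pvRuns w).map (fun p => p.1)).Pairwise (· < ·) := by
  intro w
  induction w using pvRuns.induct with
  | case1 => intro _; simp [pvRuns]
  | case2 v t ih =>
    intro hp
    rw [pvRuns, List.map_cons, List.pairwise_cons]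
    constructor
    · intro y hy
      obtain ⟨q, hq, rfl⟩ := List.mem_map.mp hy
      exact pvDropWhile_gt v t (fun u hu => (List.pairwise_cons.mp hp).1 u hu) hp.tail q.1
        (pvRuns_fst_mem _ q hq)
    · exact ih (hp.tail.sublist (List.dropWhile_sublist _))

theorem pvRuns_shape : ∀ (w : List String), ∀ p ∈ pvRuns w, p.2.1 = 0 := by
  intro w
  induction w using pvRuns.induct with
  | case1 => simp [pvRuns]
  | case2 v t ih =>
    intro p hp
    rw [pvRuns] at hp
    rcases List.mem_cons.mp hp with rfl | hp'
    · rfl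
    · exact ih p hp'

theorem pvSeen0Gen : ∀ (bs : List (String × Nat × Nat)), (∀ p ∈ bs, p.2.1 = 0) →
    pvSeenOf bs = List.replicate (pvWOf bs).length 0 := by
  intro bs
  induction bs with
  | nil => intro _; rfl
  | cons p bs ih =>
    intro h
    rw [pvSeenOf_cons, pvWOf_cons, ih (fun q hq => h q (List.mem_cons_of_mem _ hq)),
        h p List.mem_cons_self]
    simp [List.replicate_append_replicate]

theorem pvCount_runs : ∀ (w : List String), w.Pairwise (· ≤ ·) →
    ∀ p ∈ pvRuns w, List.count p.1 w = p.2.2 := by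
  intro w
  induction w using pvRuns.induct with
  | case1 => simp [pvRuns]
  | case2 v t ih =>
    intro hp p hpm
    have hle : ∀ u ∈ t, v ≤ u := (List.pairwise_cons.mp hp).1
    have hgt := pvDropWhile_gt v t hle hp.tail
    have htk : List.count v (t.takeWhile (fun x => x == v)) = (t.takeWhile (fun x => x == v)).length := by
      apply List.count_eq_length.mpr
      intro b hb
      have := List.mem_takeWhile_imp hb
      simp at this
      exact this.symm
    rw [pvRuns] at hpm
    rcases List.mem_cons.mp hpm with rfl | hpm'
    · show List.count v (v :: t) = 1 + (t.takeWhile (fun x => x == v)).length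
      rw [List.count_cons_self]
      conv_lhs => rw [← List.takeWhile_append_dropWhile (p := fun x => x == v) (l := t)]
      rw [List.count_append, htk,
          List.count_eq_zero.mpr (fun hmem => absurd rfl (hgt v hmem).ne)]
      omega
    · have hmemd : p.1 ∈ t.dropWhile (fun x => x == v) := pvRuns_fst_mem _ p hpm'
      have hne : v ≠ p.1 := (hgt p.1 hmemd).ne
      rw [List.count_cons_of_ne hne]
      conv_lhs => rw [← List.takeWhile_append_dropWhile (p := fun x => x == v) (l := t)]
      rw [List.count_append, ih (hp.tail.sublist (List.dropWhile_sublist _)) p hpm',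
          List.count_eq_zero.mpr
            (fun hmem => hne (show p.1 = v by simpa using List.mem_takeWhile_imp hmem).symm)]
      omega

theorem pvFoldl_add_mem (l : List String) : ∀ (s : PySem.Set String), (∀ x ∈ l, x ∈ s) →
    List.foldl PySem.Set.add s l = s := by
  induction l with
  | nil => intro s _; rfl
  | cons x l ih =>
    intro s h
    rw [List.foldl_cons,
        show PySem.Set.add s x = s by simp [PySem.Set.add, h x List.mem_cons_self]]
    exact ih s (fun y hy => h y (List.mem_cons_of_mem _ hy))

theorem pvFoldl_add_cons (l : List String) (v : String) : ∀ (s : PySem.Set String), v ∉ l →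
    List.foldl PySem.Set.add (v :: s) l = v :: List.foldl PySem.Set.add s l := by
  induction l with
  | nil => intro s _; rfl
  | cons x l ih =>
    intro s hv
    have hxv : x ≠ v := fun h => hv (h ▸ List.mem_cons_self)
    have hadd : PySem.Set.add (v :: s) x
        = v :: PySem.Set.add s x := by
      simp only [PySem.Set.add, PySem.Set.contains, List.contains_cons]
      rw [show (x == v) = false by simp [hxv]]
      simp only [Bool.false_or]
      by_cases h : List.contains s x = true
      · rw [if_pos h, if_pos h]
      · rw [if_neg h, if_neg h, List.cons_append]
    rw [List.foldl_cons, hadd, ih _ (fun h => hv (List.mem_cons_of_mem _ h)), List.foldl_cons]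

theorem pvOfList_sorted : ∀ (w : List String), w.Pairwise (· ≤ ·) →
    PySem.Set.ofList w = (pvRuns w).map (fun p => p.1) := by
  intro w
  induction w using pvRuns.induct with
  | case1 => intro _; simp [pvRuns]
  | case2 v t ih =>
    intro hp
    have hle : ∀ u ∈ t, v ≤ u := (List.pairwise_cons.mp hp).1
    have hgt := pvDropWhile_gt v t hle hp.tail
    rw [pvRuns, List.map_cons]
    show List.foldl PySem.Set.add PySem.Set.empty (v :: t) = _
    rw [List.foldl_cons,
        show PySem.Set.add PySem.Set.empty v = [v] from rfl]
    conv_lhs => rw [← List.takeWhile_append_dropWhile (p := fun x => x == v) (l := t)]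
    rw [List.foldl_append,
        pvFoldl_add_mem _ [v]
          (fun x hx => by simp [show x = v by simpa using List.mem_takeWhile_imp hx]),
        pvFoldl_add_cons _ v [] (fun h => absurd rfl (hgt v h).ne)]
    have hih := ih (hp.tail.sublist (List.dropWhile_sublist _))
    rw [show List.foldl PySem.Set.add ([] : PySem.Set String) (t.dropWhile (fun x => x == v))
          = PySem.Set.ofList (t.dropWhile (fun x => x == v)) from rfl, hih]

theorem pvDict_runs (w : List String) (hp : w.Pairwise (· ≤ ·)) :
    pvDictOf (pvRuns w) = PySem.Dict.counter w := by
  apply PySem.Dict.ext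
  rw [PySem.Dict.items_counter, pvOfList_sorted w hp, List.map_map]
  show (pvRuns w).map (fun p => (p.1, (p.2.2 : Int))) = _
  apply List.map_congr_left
  intro p hpm
  simp only [Function.comp_apply]
  rw [pvCount_runs w hp p hpm]

-- ===== VERDICT (by name: the statement is the Claim_ definition above) =====
theorem find_permutations_unique_spec : Claim_equal_find_permutations_unique := by
  unfold Claim_equal_find_permutations_unique Spec_find_permutations_unique
  intro word _
  show find_permutations_unique word = find_permutations_unique_alt word
  simp only [find_permutations_unique, find_permutations_unique_alt]
  rw [PySem.Dict.foldl_insert_getD_add_one_eq_counter]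
  have hp : (PySem.List.sorted word (fun x => x) false).Pairwise (· ≤ ·) :=
    PySem.List.sorted_pairwise word (fun x => x)
  have h1 : pvWOf (pvRuns (PySem.List.sorted word (fun x => x) false))
      = PySem.List.sorted word (fun x => x) false := pvRuns_wOf _ hp
  have h2 : pvSeenOf (pvRuns (PySem.List.sorted word (fun x => x) false))
      = List.replicate (PySem.List.sorted word (fun x => x) false).length 0 := by
    rw [pvSeen0Gen _ (pvRuns_shape _), h1]
  rw [← h2, ← pvDict_runs _ hp]
  exact pvMain (PySem.List.sorted word (fun x => x) false)
    (PySem.List.sorted word (fun x => x) false).length [] _ h1 (pvRuns_pairwise _ hp)
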